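-- pv_equiv track=rewrite | github.com/dariober/bioinformatics-cafe | trunk/concatenate_ame.py | crosstab
-- ===== SOURCE A (Python) =====
-- def crosstab(normtab, rowheader_index, colheader_index, value_index, missing= '', first_column_name= 'rowheader'):
--     """
--     Reshape a nomalized table given as list of lists (each inner list is a row) to
--     a cross-tab format having as rows the items in column rowheader, columns are
--     the elements in colheader and populated by the elements in values.
--
--     normtab:
--         List of lists
--     rowheader_index, colheader_index, value_index:
--         Index of the relevant columns
--     missing:
--         A value for missing variables
--
--     EXAMPLE:
--
--     normtab=  [['a', 'x', 1],
--                ['a', 'y', 0],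
--                ['a', 'z', 2],
--                ['b', 'x', 3],
--                ['b', 'z', 4]]
--     ct= crosstab(testdata, 0, 1, 2, first_column_name= 'F')
--     ct
--     [['F',  'x', 'y', 'z'],
--      ['a',   1,   0,   2 ],
--      ['b',   3,  '',   4 ]]
--
--     """
--     rowheaders= sorted(set([x[rowheader_index] for x in normtab]))
--     colheaders= sorted(set([x[colheader_index] for x in normtab]))
--     ## Dictionary of dictionaries as:
--     ## ddict= {'a' : {'x':1, 'y':0,  'z':2},
--     ##               {'b':3, 'y':'', 'z':4}}
--     ddict= {}
--
--     for i in range(0, len(normtab)):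
--         """Traverse normalized table and get all the 'rowheaders', put them in
--         the dictionary. At the end you get:
--         ddict= {'a': {'y': 0, 'x': 1, 'z': 2}, 'b': {'x': 3, 'z': 4}}
--         """
--         row= normtab[i]
--         rowheader= row[rowheader_index]
--         if rowheader not in ddict:
--             ddict[rowheader]= {}
--         "Get the column name and value for this row"
--         colheader= row[colheader_index]
--         value= row[value_index]
--         if colheader not in ddict[rowheader]:
--             ddict[rowheader][colheader]= value
--
--     "Produce list of lists of the cross-tab"
--     crosstab= [[first_column_name] + colheaders]
--     for r in rowheaders:
--         row= [r]
--         dictrow= ddict[r]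
--         for c in colheaders:
--             if c in dictrow:
--                 row.append(dictrow[c])
--             else:
--                 row.append(missing)
--         crosstab.append(row)
--     return(crosstab)
-- ===== SOURCE B (Python) =====
-- def crosstab(normtab, rowheader_index, colheader_index, value_index, missing= '', first_column_name= 'rowheader'):
--     rowheaders = sorted(set(x[rowheader_index] for x in normtab))
--     colheaders = sorted(set(x[colheader_index] for x in normtab))
--
--     def cell(r, c):
--         "Value of the first row whose headers are (r, c), else `missing`."
--         for row in normtab:
--             if row[rowheader_index] == r and row[colheader_index] == c:
--                 return row[value_index]
--         return missing
--
--     return [[first_column_name] + colheaders] + \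
--            [[r] + [cell(r, c) for c in colheaders] for r in rowheaders]
-- ===== Notes on version B (the rewrite author's own statement) =====
-- stated objective: simpler
-- what changed: Replaces A's dictionary-of-dictionaries accumulation pass with a direct first-match scan: each output cell is the value of the first input row carrying that (rowheader, colheader) pair, found by scanning normtab, with no intermediate dict at all.
import Mathlib
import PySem

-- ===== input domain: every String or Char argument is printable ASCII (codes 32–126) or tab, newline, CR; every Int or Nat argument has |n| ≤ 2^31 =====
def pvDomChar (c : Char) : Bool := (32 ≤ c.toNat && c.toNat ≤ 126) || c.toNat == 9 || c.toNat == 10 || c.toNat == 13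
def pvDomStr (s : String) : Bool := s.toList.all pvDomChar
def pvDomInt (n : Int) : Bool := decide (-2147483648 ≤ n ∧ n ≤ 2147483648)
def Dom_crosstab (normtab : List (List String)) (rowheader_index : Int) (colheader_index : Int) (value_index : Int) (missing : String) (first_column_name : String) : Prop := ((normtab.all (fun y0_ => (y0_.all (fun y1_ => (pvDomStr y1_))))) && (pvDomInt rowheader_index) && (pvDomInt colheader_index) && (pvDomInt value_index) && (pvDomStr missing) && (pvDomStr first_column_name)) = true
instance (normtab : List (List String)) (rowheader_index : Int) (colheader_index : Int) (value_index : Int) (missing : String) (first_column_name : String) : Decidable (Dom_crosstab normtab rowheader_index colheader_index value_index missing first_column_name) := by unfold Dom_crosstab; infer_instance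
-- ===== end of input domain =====

-- B replaces A's dictionary-of-dictionaries pass with a direct first-match scan per output cell (simpler decomposition, not faster); equivalence is proved on inputs where all three column indices are valid for every row (elsewhere Python A raises IndexError).

-- ===== PORT A =====
-- row[i]: exact under Pre_ (the index is in range for every row there)
def pvGetS (row : List String) (i : Int) : String := PySem.List.pyGetD row i ""

-- the body of A's 'for i in range(0, len(normtab))' loop, acting on ddict
def crosstabStep (rowheader_index colheader_index value_index : Int)
    (d : PySem.Dict String (PySem.Dict String String)) (row : List String) :
    PySem.Dict String (PySem.Dict String String) :=
  let rowheader := pvGetS row rowheader_index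
  let d1 := if d.contains rowheader then d else d.insert rowheader PySem.Dict.empty
  let colheader := pvGetS row colheader_index
  let value := pvGetS row value_index
  if (d1.getD rowheader PySem.Dict.empty).contains colheader then d1
  else d1.modify rowheader PySem.Dict.empty (fun m => m.insert colheader value)

def crosstab (normtab : List (List String)) (rowheader_index : Int) (colheader_index : Int) (value_index : Int) (missing : String) (first_column_name : String) : List (List String) :=
  let rowheaders := PySem.List.sorted (PySem.Set.ofList (normtab.map (fun x => pvGetS x rowheader_index))) (fun x => x) false
  let colheaders := PySem.List.sorted (PySem.Set.ofList (normtab.map (fun x => pvGetS x colheader_index))) (fun x => x) false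
  let ddict := (PySem.List.pyRange 0 normtab.length 1).foldl
      (fun d i => crosstabStep rowheader_index colheader_index value_index d (PySem.List.pyGetD normtab i [])) PySem.Dict.empty
  (first_column_name :: colheaders) ::
    rowheaders.map (fun r =>
      let dictrow := ddict.getD r PySem.Dict.empty  -- ddict[r]: r is always a key here
      r :: colheaders.map (fun c => if dictrow.contains c then dictrow.getD c "" else missing))

-- ===== PORT B =====
-- Source B's cell(r, c): value of the first row whose headers are (r, c), else missing
def pvCell (rowheader_index colheader_index value_index : Int) (missing r c : String) :
    List (List String) → String
  | [] => missing
  | row :: rest =>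
    if pvGetS row rowheader_index == r && pvGetS row colheader_index == c then
      pvGetS row value_index
    else pvCell rowheader_index colheader_index value_index missing r c rest

def crosstab_alt (normtab : List (List String)) (rowheader_index : Int) (colheader_index : Int) (value_index : Int) (missing : String) (first_column_name : String) : List (List String) :=
  let rowheaders := PySem.List.sorted (PySem.Set.ofList (normtab.map (fun x => pvGetS x rowheader_index))) (fun x => x) false
  let colheaders := PySem.List.sorted (PySem.Set.ofList (normtab.map (fun x => pvGetS x colheader_index))) (fun x => x) false
  (first_column_name :: colheaders) ::
    rowheaders.map (fun r =>
      r :: colheaders.map (fun c =>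
        pvCell rowheader_index colheader_index value_index missing r c normtab))

-- ===== PRECONDITION & SPEC =====
-- Pre_: exactly the inputs where Python A returns normally — all three column indices valid for every row (otherwise A raises IndexError)
def Pre_crosstab (normtab : List (List String)) (rowheader_index : Int) (colheader_index : Int) (value_index : Int) (missing : String) (first_column_name : String) : Prop :=
  ∀ row ∈ normtab, PySem.Raise.InRange row.length rowheader_index ∧
    PySem.Raise.InRange row.length colheader_index ∧
    PySem.Raise.InRange row.length value_index
instance (normtab : List (List String)) (rowheader_index : Int) (colheader_index : Int) (value_index : Int) (missing : String) (first_column_name : String) : Decidable (Pre_crosstab normtab rowheader_index colheader_index value_index missing first_column_name) := by unfold Pre_crosstab; infer_instance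

def pvWitness_crosstab : List (List String) × Int × Int × Int × String × String :=
  ([["a", "x", "1"], ["b", "x", "2"]], 0, 1, 2, "", "rowheader")

def Spec_crosstab (normtab : List (List String)) (rowheader_index : Int) (colheader_index : Int) (value_index : Int) (missing : String) (first_column_name : String) (out : List (List String)) : Prop := out = crosstab_alt normtab rowheader_index colheader_index value_index missing first_column_name
instance (normtab : List (List String)) (rowheader_index : Int) (colheader_index : Int) (value_index : Int) (missing : String) (first_column_name : String) (out : List (List String)) : Decidable (Spec_crosstab normtab rowheader_index colheader_index value_index missing first_column_name out) := by unfold Spec_crosstab; infer_instance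

-- ===== CLAIM (what is proved, stated in full; the proofs are below) =====
def Claim_equal_crosstab : Prop := ∀ (normtab : List (List String)) (rowheader_index : Int) (colheader_index : Int) (value_index : Int) (missing : String) (first_column_name : String), Dom_crosstab normtab rowheader_index colheader_index value_index missing first_column_name → Pre_crosstab normtab rowheader_index colheader_index value_index missing first_column_name → Spec_crosstab normtab rowheader_index colheader_index value_index missing first_column_name (crosstab normtab rowheader_index colheader_index value_index missing first_column_name)

-- ===== LEMMAS AND PROOFS =====

theorem pvWitness_ok : Dom_crosstab pvWitness_crosstab.1 pvWitness_crosstab.2.1 pvWitness_crosstab.2.2.1 pvWitness_crosstab.2.2.2.1 pvWitness_crosstab.2.2.2.2.1 pvWitness_crosstab.2.2.2.2.2 ∧ Pre_crosstab pvWitness_crosstab.1 pvWitness_crosstab.2.1 pvWitness_crosstab.2.2.1 pvWitness_crosstab.2.2.2.1 pvWitness_crosstab.2.2.2.2.1 pvWitness_crosstab.2.2.2.2.2 := by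
  constructor <;> decide

-- first-match lookup that both sides are shown to compute
def pvFM (ri ci vi : Int) (r c : String) (rows : List (List String)) : Option String :=
  (rows.find? (fun row => pvGetS row ri == r && pvGetS row ci == c)).map
    (fun row => pvGetS row vi)

theorem pvCell_eq (ri ci vi : Int) (missing r c : String) (rows : List (List String)) :
    pvCell ri ci vi missing r c rows = (pvFM ri ci vi r c rows).getD missing := by
  induction rows with
  | nil => rfl
  | cons row rest ih =>
    by_cases h : (pvGetS row ri == r && pvGetS row ci == c) = true
    · simp [pvCell, pvFM, h]
    · simp only [pvCell, pvFM, List.find?_cons] at *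
      simp [h, ih]

theorem pvFM_cons (ri ci vi : Int) (r c : String) (row : List String) (rest : List (List String)) :
    pvFM ri ci vi r c (row :: rest) = (pvFM ri ci vi r c [row]).or (pvFM ri ci vi r c rest) := by
  by_cases h : (pvGetS row ri == r && pvGetS row ci == c) = true <;>
    simp [pvFM, h]

theorem pvFM_singleton (ri ci vi : Int) (r c : String) (row : List String) :
    pvFM ri ci vi r c [row]
      = if (pvGetS row ri == r && pvGetS row ci == c) = true then some (pvGetS row vi)
        else none := by
  by_cases h : (pvGetS row ri == r && pvGetS row ci == c) = true <;> simp [pvFM, h]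

theorem step_lookup (ri ci vi : Int) (d : PySem.Dict String (PySem.Dict String String))
    (row : List String) (r c : String) :
    ((crosstabStep ri ci vi d row).getD r PySem.Dict.empty).get? c
      = ((d.getD r PySem.Dict.empty).get? c).or (pvFM ri ci vi r c [row]) := by
  rw [pvFM_singleton]
  unfold crosstabStep
  simp only []
  have h1 : (if d.contains (pvGetS row ri) then d else d.insert (pvGetS row ri) PySem.Dict.empty).getD (pvGetS row ri) PySem.Dict.empty = d.getD (pvGetS row ri) PySem.Dict.empty := by
    by_cases hc : d.contains (pvGetS row ri)
    · simp [hc]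
    · simp only [hc, Bool.false_eq_true, if_false]
      rw [PySem.Dict.getD_insert_self, PySem.Dict.getD_of_not_contains]
      simpa using hc
  by_cases hr : r = pvGetS row ri
  · subst hr
    rw [h1]
    by_cases h2 : (d.getD (pvGetS row ri) PySem.Dict.empty).contains (pvGetS row ci)
    · simp only [h2, if_true, h1]
      by_cases hcc : pvGetS row ci = c
      · subst hcc
        rw [PySem.Dict.contains_eq_isSome_get?] at h2
        cases hx : (d.getD (pvGetS row ri) PySem.Dict.empty).get? (pvGetS row ci) with
        | none => rw [hx] at h2; simp at h2
        | some v => simp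
      · have : (pvGetS row ci == c) = false := by simp [hcc]
        simp [this]
    · simp only [h2, Bool.false_eq_true, if_false]
      rw [PySem.Dict.getD_modify_self, h1, PySem.Dict.get?_insert]
      by_cases hcc : c = pvGetS row ci
      · subst hcc
        have hn : (d.getD (pvGetS row ri) PySem.Dict.empty).get? (pvGetS row ci) = none := by
          rw [PySem.Dict.get?_eq_none_iff_contains]
          simpa using h2
        simp [hn]
      · have : (pvGetS row ci == c) = false := by
          simp only [beq_eq_false_iff_ne, ne_eq]
          exact fun h => hcc h.symm
        simp [hcc, this]
  · have hfm : (pvGetS row ri == r && pvGetS row ci == c) = false := by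
      simp only [Bool.and_eq_false_iff, beq_eq_false_iff_ne, ne_eq]
      exact Or.inl (fun h => hr h.symm)
    simp only [hfm, Bool.false_eq_true, if_false, Option.or_none]
    split_ifs <;> simp [PySem.Dict.getD_insert, PySem.Dict.getD_modify, hr]

theorem foldl_lookup (ri ci vi : Int) (rows : List (List String)) :
    ∀ (d : PySem.Dict String (PySem.Dict String String)) (r c : String),
    ((rows.foldl (crosstabStep ri ci vi) d).getD r PySem.Dict.empty).get? c
      = ((d.getD r PySem.Dict.empty).get? c).or (pvFM ri ci vi r c rows) := by
  induction rows with
  | nil => intro d r c; simp [pvFM]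
  | cons row rest ih =>
    intro d r c
    simp only [List.foldl_cons]
    rw [ih, step_lookup, pvFM_cons ri ci vi r c row rest, Option.or_assoc]

-- ===== VERDICT (by name: the statement is the Claim_ definition above) =====
theorem crosstab_spec : Claim_equal_crosstab := by
  intro normtab ri ci vi missing fcn _ _
  unfold Spec_crosstab crosstab crosstab_alt
  simp only [PySem.List.foldl_pyRange_zero_pyGetD']
  congr 1
  apply List.map_congr_left
  intro r _
  congr 1
  apply List.map_congr_left
  intro c _
  rw [pvCell_eq]
  have h := foldl_lookup ri ci vi normtab PySem.Dict.empty r c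
  simp only [PySem.Dict.get?_empty, PySem.Dict.getD_eq_get?_getD] at h
  rw [PySem.Dict.contains_eq_isSome_get?, PySem.Dict.getD_eq_get?_getD,
      PySem.Dict.getD_eq_get?_getD, h]
  cases pvFM ri ci vi r c normtab <;> simp
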